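-- pv_equiv track=rewrite | github.com/louisyang2015/movie_recommender | python/100k_data/ratings_als.py | remap_ids
-- ===== SOURCE A (Python) =====
-- def remap_ids(id_list: list):
--     """Remap ids in "id_list" to zero based values.
--
--     return new_id_list, zero_based_id_lookup
--     """
--     zero_based_id_lookup = {} # {standard id: zero based id}
--     new_id_list = []
--     next_free_id = 0
--
--     for i in range(0, len(id_list)):
--         id = id_list[i]
--
--         if id not in zero_based_id_lookup:
--             zero_based_id_lookup[id] = next_free_id
--             next_free_id += 1
--
--         new_id_list.append(zero_based_id_lookup[id])
--
--     return new_id_list, zero_based_id_lookup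
-- ===== SOURCE B (Python) =====
-- def remap_ids(id_list: list):
--     """Remap ids in "id_list" to zero based values.
--
--     return new_id_list, zero_based_id_lookup
--     """
--     unique_ids = list(dict.fromkeys(id_list))
--     zero_based_id_lookup = {id: k for k, id in enumerate(unique_ids)}
--     new_id_list = [zero_based_id_lookup[id] for id in id_list]
--     return new_id_list, zero_based_id_lookup
-- ===== Notes on version B (the rewrite author's own statement) =====
-- stated objective: simpler
-- what changed: Replaces the single fused loop that interleaves building the lookup dict and appending remapped ids with three separate passes: dict.fromkeys to get first-appearance unique ids, enumerate to build the zero-based lookup table, and a final comprehension that remaps the whole list against the completed table.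
import Mathlib
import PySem

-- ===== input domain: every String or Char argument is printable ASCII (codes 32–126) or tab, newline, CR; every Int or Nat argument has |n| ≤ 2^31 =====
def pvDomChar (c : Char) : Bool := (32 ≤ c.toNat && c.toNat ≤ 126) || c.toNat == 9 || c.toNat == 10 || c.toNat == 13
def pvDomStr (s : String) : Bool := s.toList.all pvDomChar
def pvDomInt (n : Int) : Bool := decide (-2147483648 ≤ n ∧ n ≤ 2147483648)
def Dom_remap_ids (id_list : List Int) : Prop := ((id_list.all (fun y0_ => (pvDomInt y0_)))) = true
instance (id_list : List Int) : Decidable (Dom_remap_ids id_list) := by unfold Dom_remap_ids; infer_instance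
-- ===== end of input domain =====

-- B separates index-table construction (dedup + enumerate) from the remapping pass,
-- instead of A's single fused build-and-append loop; objective: simpler decomposition.

-- ===== PORT A =====
-- the fused loop: state = (new_id_list, zero_based_id_lookup as assoc list, next_free_id);
-- `id not in d` / `d[id] = v` on a fresh key append, `d[id]` is first-match lookup.
def remapLoopA : List Int → List Int × List (Int × Int) × Int → List Int × List (Int × Int) × Int
  | [], st => st
  | id :: rest, (new_id_list, lk, next_free_id) =>
      let (lk', nf') :=
        if (lk.lookup id).isNone then (lk ++ [(id, next_free_id)], next_free_id + 1)
        else (lk, next_free_id)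
      -- `.getD 0` never fires: `id` was just inserted if absent (Python's d[id] cannot KeyError here)
      remapLoopA rest (new_id_list ++ [((lk'.lookup id).getD 0)], lk', nf')

def remap_ids (id_list : List Int) : List Int × (List (Int × Int)) :=
  let (new_id_list, zero_based_id_lookup, _) := remapLoopA id_list ([], [], 0)
  (new_id_list, zero_based_id_lookup)

-- ===== PORT B =====
-- list(dict.fromkeys(id_list)) = PySem.List.dedup; the dict comprehension over enumerate has
-- distinct keys, so it is exactly this map; lookup[id] always hits (`.getD 0` never fires).
def remap_ids_alt (id_list : List Int) : List Int × (List (Int × Int)) :=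
  let unique_ids := PySem.List.dedup id_list
  let zero_based_id_lookup := (PySem.List.enumerate unique_ids 0).map (fun p => (p.2, p.1))
  let new_id_list := id_list.map (fun id => (zero_based_id_lookup.lookup id).getD 0)
  (new_id_list, zero_based_id_lookup)

-- ===== PRECONDITION & SPEC =====
def Spec_remap_ids (id_list : List Int) (out : List Int × (List (Int × Int))) : Prop := out = remap_ids_alt id_list
instance (id_list : List Int) (out : List Int × (List (Int × Int))) : Decidable (Spec_remap_ids id_list out) := by unfold Spec_remap_ids; infer_instance

-- ===== CLAIM (what is proved, stated in full; the proofs are below) =====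
def Claim_equal_remap_ids : Prop := ∀ (id_list : List Int), Dom_remap_ids id_list → Spec_remap_ids id_list (remap_ids id_list)

-- ===== LEMMAS AND PROOFS =====

-- the lookup table of a list of distinct ids, numbered from s
def tbl (u : List Int) (s : Int) : List (Int × Int) :=
  (PySem.List.enumerate u s).map (fun p => (p.2, p.1))

-- accumulate unseen ids of xs onto u, in first-appearance order
def dfrom (u : List Int) (xs : List Int) : List Int :=
  xs.foldl (fun a x => if x ∈ a then a else a ++ [x]) u

lemma dfrom_eq_dedup (xs : List Int) : dfrom [] xs = PySem.List.dedup xs := by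
  have h : ∀ (xs u : List Int), dfrom u xs = List.foldl PySem.Set.add u xs := by
    intro xs
    induction xs with
    | nil => intro u; rfl
    | cons x t ih =>
      intro u
      simp only [dfrom, List.foldl_cons] at *
      rw [← PySem.Set.add_eq_ite u x] at *
      exact ih _
  simp [h xs [], PySem.List.dedup, PySem.Set.ofList]

lemma tbl_append_singleton (u : List Int) (x : Int) (s : Int) :
    tbl (u ++ [x]) s = tbl u s ++ [(x, s + u.length)] := by
  induction u generalizing s with
  | nil => simp [tbl, PySem.List.enumerate_cons, PySem.List.enumerate_nil]
  | cons y t ih =>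
    simp only [tbl, List.cons_append, PySem.List.enumerate_cons, List.map_cons] at *
    rw [ih (s + 1)]
    simp only [List.length_cons]
    push_cast
    rw [add_assoc, add_comm (1 : Int)]

lemma lookup_tbl_none (u : List Int) (x : Int) (hx : x ∉ u) :
    ∀ s : Int, (tbl u s).lookup x = none := by
  induction u with
  | nil => intro s; rfl
  | cons y t ih =>
    intro s
    simp only [List.mem_cons, not_or] at hx
    simp only [tbl, PySem.List.enumerate_cons, List.map_cons, List.lookup]
    have hxy : (x == y) = false := by simp [hx.1]
    simp only [hxy]
    exact ih hx.2 (s + 1)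

lemma lookup_tbl_mem (u : List Int) (x : Int) (hx : x ∈ u) :
    ∀ s : Int, ∃ v, (tbl u s).lookup x = some v := by
  induction u with
  | nil => cases hx
  | cons y t ih =>
    intro s
    by_cases hxy : x == y
    · exact ⟨s, by simp only [tbl, PySem.List.enumerate_cons, List.map_cons, List.lookup, hxy]⟩
    · have hxt : x ∈ t := by
        rcases List.mem_cons.mp hx with h1 | h1
        · exact absurd h1 (by simpa using hxy)
        · exact h1
      rcases ih hxt (s + 1) with ⟨v, hv⟩
      exact ⟨v, by simp only [tbl, PySem.List.enumerate_cons, List.map_cons, List.lookup, hxy]; exact hv⟩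

lemma lookup_append_of_none (x : Int) (l l2 : List (Int × Int)) (h : l.lookup x = none) :
    (l ++ l2).lookup x = l2.lookup x := by
  induction l with
  | nil => rfl
  | cons p t ih =>
    by_cases hx : x == p.1
    · simp only [List.lookup, hx] at h; cases h
    · simp only [List.cons_append, List.lookup, hx] at h ⊢; exact ih h

lemma lookup_append_of_some (x v : Int) (l l2 : List (Int × Int)) (h : l.lookup x = some v) :
    (l ++ l2).lookup x = some v := by
  induction l with
  | nil => cases h
  | cons p t ih =>
    by_cases hx : x == p.1
    · simp only [List.cons_append, List.lookup, hx] at h ⊢; exact h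
    · simp only [List.cons_append, List.lookup, hx] at h ⊢; exact ih h

lemma tbl_append (u w : List Int) (s : Int) :
    tbl (u ++ w) s = tbl u s ++ tbl w (s + u.length) := by
  induction w generalizing u with
  | nil => simp [tbl, PySem.List.enumerate_nil]
  | cons y t ih =>
    have h1 : u ++ y :: t = (u ++ [y]) ++ t := by simp
    rw [h1, ih (u ++ [y]), tbl_append_singleton]
    simp only [tbl, PySem.List.enumerate_cons, List.map_cons, List.length_append,
      List.length_cons, List.length_nil, List.append_assoc, List.singleton_append]
    push_cast
    rw [← add_assoc]

-- a value already in the table keeps its lookup under any extension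
lemma lookup_tbl_mono (u w : List Int) (x s v : Int) (h : (tbl u s).lookup x = some v) :
    (tbl (u ++ w) s).lookup x = some v := by
  rw [tbl_append]
  exact lookup_append_of_some _ _ _ _ h

lemma dfrom_append (u xs : List Int) : ∃ w, dfrom u xs = u ++ w := by
  induction xs generalizing u with
  | nil => exact ⟨[], by simp [dfrom]⟩
  | cons x t ih =>
    simp only [dfrom, List.foldl_cons]
    by_cases hx : x ∈ u
    · simpa [hx] using ih u
    · rcases ih (u ++ [x]) with ⟨w, hw⟩
      exact ⟨x :: w, by simpa [hx] using hw⟩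

-- main invariant of A's fused loop
lemma loopA_invariant : ∀ (xs u new_id_list : List Int),
    remapLoopA xs (new_id_list, tbl u 0, (u.length : Int)) =
      (new_id_list ++ xs.map (fun id => ((tbl (dfrom u xs) 0).lookup id).getD 0),
       tbl (dfrom u xs) 0, ((dfrom u xs).length : Int)) := by
  intro xs
  induction xs with
  | nil => intro u nl; simp [remapLoopA, dfrom]
  | cons x t ih =>
    intro u nl
    by_cases hx : x ∈ u
    · rcases lookup_tbl_mem u x hx 0 with ⟨v, hv⟩
      have hstep : dfrom u (x :: t) = dfrom u t := by simp [dfrom, hx]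
      have hif : (if ((tbl u 0).lookup x).isNone
            then (tbl u 0 ++ [(x, (u.length : Int))], (u.length : Int) + 1)
            else (tbl u 0, (u.length : Int))) = (tbl u 0, (u.length : Int)) := by
        simp [hv]
      simp only [remapLoopA, hif]
      rw [ih u (nl ++ [((tbl u 0).lookup x).getD 0]), hstep]
      rcases dfrom_append u t with ⟨w, hw⟩
      have hvfin : (tbl (dfrom u t) 0).lookup x = some v := by
        rw [hw]; exact lookup_tbl_mono u w x 0 v hv
      simp [hv, hvfin]
    · have hv : (tbl u 0).lookup x = none := lookup_tbl_none u x hx 0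
      have hstep : dfrom u (x :: t) = dfrom (u ++ [x]) t := by simp [dfrom, hx]
      have htbl : tbl u 0 ++ [(x, (u.length : Int))] = tbl (u ++ [x]) 0 := by
        rw [tbl_append_singleton]; simp
      have hif : (if ((tbl u 0).lookup x).isNone
            then (tbl u 0 ++ [(x, (u.length : Int))], (u.length : Int) + 1)
            else (tbl u 0, (u.length : Int))) = (tbl (u ++ [x]) 0, ((u ++ [x]).length : Int)) := by
        rw [if_pos (by simp [hv]), htbl]
        simp
      simp only [remapLoopA, hif]
      rw [ih (u ++ [x]) _, hstep]
      have hvx : (tbl (u ++ [x]) 0).lookup x = some (u.length : Int) := by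
        rw [← htbl, lookup_append_of_none x _ _ hv]
        simp [List.lookup]
      rcases dfrom_append (u ++ [x]) t with ⟨w, hw⟩
      have hvfin : (tbl (dfrom (u ++ [x]) t) 0).lookup x = some (u.length : Int) := by
        rw [hw]; exact lookup_tbl_mono _ w x 0 _ hvx
      simp [hvx, hvfin]

-- ===== VERDICT (by name: the statement is the Claim_ definition above) =====
theorem remap_ids_spec : Claim_equal_remap_ids := by
  intro id_list _
  unfold Spec_remap_ids remap_ids remap_ids_alt
  have h := loopA_invariant id_list [] []
  have h0 : tbl [] 0 = ([] : List (Int × Int)) := rfl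
  rw [h0] at h
  rw [show ((([] : List Int).length : Int)) = 0 from rfl] at h
  rw [h, dfrom_eq_dedup]
  simp [tbl]
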